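-- pv_equiv track=rewrite | github.com/liskos/zadanie25osipov | variant_09/25.py | f
-- ===== SOURCE A (Python) =====
-- def f(x):
--     k = 0
--     max = 0
--     if x %2 == 0:
--         return 0, 0
--     c = int(x**0.5)
--     c2 = c//2
--     for i in range(3, c +1, 2):
--         if x % i == 0:
--             if x % (i*i) == 0 and i < c2:
--                 return 0, 0
--             m = x//i
--             if i == m:
--                 k += 1
--             else:
--                 k += 2
--                 if k > 3:
--                     return 0, 0
--             if max < m: max = m
--     return max, k
-- ===== SOURCE B (Python) =====
-- def f(x):
--     # Gather-then-reduce: collect the odd trial divisors first, then decide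
--     # every bail-out from the gathered list instead of interleaving exits.
--     if x % 2 == 0:
--         return 0, 0
--     c = int(x**0.5)
--     c2 = c // 2
--     divs = [i for i in range(3, c + 1, 2) if x % i == 0]
--     if any(x % (i * i) == 0 and i < c2 for i in divs):
--         return 0, 0
--     k = sum(1 if i * i == x else 2 for i in divs)
--     if k > 3:
--         return 0, 0
--     return max((x // i for i in divs), default=0), k
-- ===== Notes on version B (the rewrite author's own statement) =====
-- stated objective: simpler
-- what changed: Replaces A's single interleaved loop with three early returns buried inside it by a gather-then-reduce decomposition: build the odd divisor list once, then decide each bail-out (squared-divisor test, weighted count > 3) and the maximum cofactor as separate whole-list reductions.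
import Mathlib
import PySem

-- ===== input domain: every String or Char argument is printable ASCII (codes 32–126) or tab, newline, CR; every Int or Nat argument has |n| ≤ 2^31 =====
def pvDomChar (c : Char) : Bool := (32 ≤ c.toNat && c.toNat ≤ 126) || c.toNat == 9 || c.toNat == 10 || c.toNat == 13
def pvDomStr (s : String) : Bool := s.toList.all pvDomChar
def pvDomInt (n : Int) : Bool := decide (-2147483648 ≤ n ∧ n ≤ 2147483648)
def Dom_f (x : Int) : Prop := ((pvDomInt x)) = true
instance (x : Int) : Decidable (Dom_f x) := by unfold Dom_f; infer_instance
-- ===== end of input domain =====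

-- B restructures A's interleaved early-exit loop into gather-then-reduce (divisor
-- list built once, each bail-out decided as a whole-list reduction); same cost.

-- ===== PORT A =====
-- int(x**0.5): exact as integer sqrt on the admitted inputs (0 ≤ x ≤ 2^31,
-- where the float computation of x**0.5 cannot cross an integer boundary).
def pysqrt (x : Int) : Int := (Nat.sqrt x.toNat : Int)

def fLoop (x c2 : Int) : List Int → Int → Int → Int × Int
  | [], mx, k => (mx, k)
  | i :: rest, mx, k =>
    if PySem.Int.mod x i = 0 then
      if PySem.Int.mod x (i * i) = 0 ∧ i < c2 then (0, 0)
      else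
        let m := PySem.Int.floordiv x i
        if i = m then
          fLoop x c2 rest (if mx < m then m else mx) (k + 1)
        else if k + 2 > 3 then (0, 0)
        else fLoop x c2 rest (if mx < m then m else mx) (k + 2)
    else fLoop x c2 rest mx k

def f (x : Int) : Int × Int :=
  if PySem.Int.mod x 2 = 0 then (0, 0)
  else
    let c := pysqrt x
    let c2 := PySem.Int.floordiv c 2
    fLoop x c2 (PySem.List.pyRange 3 (c + 1) 2) 0 0

-- ===== PORT B =====
def f_alt (x : Int) : Int × Int :=
  if PySem.Int.mod x 2 = 0 then (0, 0)
  else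
    let c := pysqrt x
    let c2 := PySem.Int.floordiv c 2
    let divs := (PySem.List.pyRange 3 (c + 1) 2).filter
      (fun i => decide (PySem.Int.mod x i = 0))
    if divs.any (fun i => decide (PySem.Int.mod x (i * i) = 0 ∧ i < c2)) then (0, 0)
    else
      let k := (divs.map (fun i => if i * i = x then (1 : Int) else 2)).sum
      if k > 3 then (0, 0)
      else
        -- max(gen, default=0): all quotients are positive here, so foldl max 0 is exact
        ((divs.map (fun i => PySem.Int.floordiv x i)).foldl max 0, k)

-- ===== PRECONDITION & SPEC =====
-- Pre_ excludes negative odd x, on which Python's x**0.5 is a complex number and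
-- int() of it raises TypeError (both A and B raise there).
def Pre_f (x : Int) : Prop := 0 ≤ x ∨ PySem.Int.mod x 2 = 0
instance (x : Int) : Decidable (Pre_f x) := by unfold Pre_f; infer_instance
def pvWitness_f : Int := 9

def Spec_f (x : Int) (out : Int × Int) : Prop := out = f_alt x
instance (x : Int) (out : Int × Int) : Decidable (Spec_f x out) := by unfold Spec_f; infer_instance

-- ===== CLAIM (what is proved, stated in full; the proofs are below) =====
def Claim_equal_f : Prop := ∀ (x : Int), Dom_f x → Pre_f x → Spec_f x (f x)

-- ===== LEMMAS AND PROOFS =====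

-- for a divisor i ≥ 3 of x, "i == x // i" is exactly "i*i == x"
lemma pv_sq_iff (x i : Int) (h3 : 3 ≤ i) (hd : PySem.Int.mod x i = 0) :
    (i = PySem.Int.floordiv x i) ↔ i * i = x := by
  have hi : (0 : Int) < i := by omega
  have hdvd : i ∣ x := (PySem.Int.mod_eq_zero_iff_dvd x i).mp hd
  rw [PySem.Int.floordiv_eq_ediv_of_pos hi]
  constructor
  · intro h
    calc i * i = (x / i) * i := by rw [← h]
      _ = x := Int.ediv_mul_cancel hdvd
  · intro h
    have : x / i = i := by rw [← h, Int.mul_ediv_cancel _ (by omega : i ≠ 0)]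
    omega

lemma pv_sum_w_nonneg (x : Int) (l : List Int) :
    0 ≤ (l.map (fun i => if i * i = x then (1 : Int) else 2)).sum := by
  apply List.sum_nonneg
  intro a ha
  rcases List.mem_map.mp ha with ⟨i, _, rfl⟩
  split <;> norm_num

lemma pv_max_if (mx m : Int) : (if mx < m then m else mx) = max mx m := by
  split <;> omega

lemma fLoop_eq (x c2 : Int) (l : List Int) (mx k : Int)
    (hpos : ∀ i ∈ l, 3 ≤ i) (hnd : l.Nodup) (hk : k ≤ 3)
    (hk2 : (∃ i ∈ l, PySem.Int.mod x i = 0 ∧ i * i = x) → 2 ∣ k) :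
    fLoop x c2 l mx k =
      (let divs := l.filter (fun i => decide (PySem.Int.mod x i = 0));
       if divs.any (fun i => decide (PySem.Int.mod x (i * i) = 0 ∧ i < c2)) then (0, 0)
       else
         let k' := k + (divs.map (fun i => if i * i = x then (1 : Int) else 2)).sum;
         if k' > 3 then (0, 0)
         else ((divs.map (fun i => PySem.Int.floordiv x i)).foldl max mx, k')) := by
  induction l generalizing mx k with
  | nil =>
      simp [fLoop]
      omega
  | cons i rest ih =>
      have h3 : 3 ≤ i := hpos i (List.mem_cons_self ..)
      have hposr : ∀ j ∈ rest, 3 ≤ j := fun j hj => hpos j (List.mem_cons_of_mem _ hj)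
      have hndr : rest.Nodup := hnd.of_cons
      by_cases hxi : PySem.Int.mod x i = 0
      · by_cases hq : PySem.Int.mod x (i * i) = 0 ∧ i < c2
        · simp [fLoop, hxi, hq]
        · by_cases hsq : i = PySem.Int.floordiv x i
          · -- square divisor: i*i = x
            have hsx : i * i = x := (pv_sq_iff x i h3 hxi).mp hsq
            have hk2' : 2 ∣ k := hk2 ⟨i, List.mem_cons_self .., hxi, hsx⟩
            have hnor : ¬ ∃ j ∈ rest, PySem.Int.mod x j = 0 ∧ j * j = x := by
              rintro ⟨j, hjm, -, hjs⟩
              have hj3 : 3 ≤ j := hposr j hjm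
              have : j = i := by nlinarith [hjs, hsx]
              exact (List.nodup_cons.mp hnd).1 (this ▸ hjm)
            have := ih (if mx < PySem.Int.floordiv x i then PySem.Int.floordiv x i else mx)
              (k + 1) hposr hndr (by omega) (fun h => absurd h hnor)
            have hmodxx : PySem.Int.mod x x = 0 := (PySem.Int.mod_eq_zero_iff_dvd x x).mpr dvd_rfl
            have hc2 : ¬ i < c2 := fun h => hq ⟨by rw [hsx]; exact hmodxx, h⟩
            simp only [fLoop, if_pos hxi, if_neg hq, if_pos hsq, this]
            simp [hxi, hsx, hc2, pv_max_if]
            simp only [← add_assoc]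
          · have hsx : ¬ i * i = x := fun h => hsq ((pv_sq_iff x i h3 hxi).mpr h)
            by_cases hk3 : k + 2 > 3
            · -- early exit; the reduced form also yields (0,0)
              have hsum := pv_sum_w_nonneg x (rest.filter (fun j => decide (PySem.Int.mod x j = 0)))
              simp only [fLoop, if_pos hxi, if_neg hq, if_neg hsq, if_pos hk3]
              simp [hxi, hq, hsx]
              intro _; omega
            · have hk2' : (∃ j ∈ rest, PySem.Int.mod x j = 0 ∧ j * j = x) → 2 ∣ (k + 2) := by
                intro h
                rcases h with ⟨j, hjm, hjd, hjs⟩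
                have := hk2 ⟨j, List.mem_cons_of_mem _ hjm, hjd, hjs⟩
                omega
              have := ih (if mx < PySem.Int.floordiv x i then PySem.Int.floordiv x i else mx)
                (k + 2) hposr hndr (by omega) hk2'
              simp only [fLoop, if_pos hxi, if_neg hq, if_neg hsq, if_neg hk3, this]
              simp [hxi, hq, hsx, pv_max_if]
              simp only [← add_assoc]
      · have hk2' : (∃ j ∈ rest, PySem.Int.mod x j = 0 ∧ j * j = x) → 2 ∣ k := by
          rintro ⟨j, hjm, hjd, hjs⟩
          exact hk2 ⟨j, List.mem_cons_of_mem _ hjm, hjd, hjs⟩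
        have := ih mx k hposr hndr hk hk2'
        simp only [fLoop, if_neg hxi, this]
        simp [hxi]

lemma pv_range_pos (a b : Int) (ha : 3 ≤ a) : ∀ i ∈ PySem.List.pyRange a b 2, 3 ≤ i := by
  intro i hi
  have := (PySem.List.mem_pyRange_iff_of_pos (by norm_num : (0:Int) < 2) i).mp hi
  omega

lemma pv_range_nodup (a b : Int) : (PySem.List.pyRange a b 2).Nodup := by
  rw [PySem.List.pyRange_of_pos a b (by norm_num : (0:Int) < 2)]
  apply List.Nodup.map
  · intro k1 k2 h
    simp only at h
    omega
  · exact List.nodup_range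

-- ===== VERDICT (by name: the statement is the Claim_ definition above) =====
theorem f_spec : Claim_equal_f := by
  intro x _ _
  unfold Spec_f f f_alt
  by_cases he : PySem.Int.mod x 2 = 0
  · simp only [if_pos he]
  · simp only [if_neg he]
    rw [fLoop_eq x _ _ 0 0 (pv_range_pos 3 _ le_rfl) (pv_range_nodup 3 _) (by norm_num)
      (fun _ => ⟨0, rfl⟩)]
    simp [zero_add]
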